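-- pv_equiv track=rewrite | github.com/thommann/duck | src/queries.py | queries
-- ===== SOURCE A (Python) =====
-- import itertools
--
-- def kronecker_indices(col_idx: int, nr_cols_a: int, nr_cols_b: int, sc: bool, r: int, max_rank: int) -> tuple[int, int]:
--     if sc:
--         col_idx_a = col_idx_b = col_idx * max_rank + r
--     else:
--         col_idx_a = col_idx // nr_cols_b
--         col_idx_b = col_idx % nr_cols_b
--         col_idx_a = col_idx_a + r * nr_cols_a
--         col_idx_b = col_idx_b + r * nr_cols_b
--     return col_idx_a, col_idx_b
--
-- def queries(col_indices: list[int],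
--             nr_cols: int,
--             rank_k: int,
--             max_rank: int,
--             sc: bool = False,
--             cc: bool = False,
--             nr_cols_b: int = None):
--     """
--     Generates the original and Kronecker queries for the given column indices, number of columns and rank.
--     :param col_indices: list of column indices
--     :param nr_cols: number of columns in the input matrices
--     :param rank_k: rank of the input matrices
--     :param max_rank: maximum rank of the input matrices
--     :param sc: whether to use single-column Kronecker queries
--     :param cc: whether to use compressed-column Kronecker queries
--     :param nr_cols_b: number of columns in the second kronecker matrix (only used if cc is True)
--     :return: original and Kronecker queries
--     """
--     assert not (sc and cc)
--     assert (cc and nr_cols_b is not None) or (not cc and nr_cols_b is None)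
--
--     nr_cols_b = nr_cols if sc else nr_cols_b if cc else 1
--     nr_cols_a = nr_cols if sc else nr_cols // nr_cols_b
--
--     col_format_a = "03d" if nr_cols_a * max_rank > 100 else "02d" if nr_cols_a * max_rank > 10 else "01d"
--     col_format_b = "03d" if nr_cols_b * max_rank > 100 else "02d" if nr_cols_b * max_rank > 10 else "01d"
--     col_format_c = "03d" if nr_cols > 100 else "02d" if nr_cols > 10 else "01d"
--
--     original_query = f"SELECT SUM({' * '.join([f'column{i:{col_format_c}}' for i in col_indices])}) FROM C;"
--
--     if len(col_indices) == 1: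
--         # SUM
--         col_idx = col_indices[0]
--         terms = []
--         for r in range(rank_k):
--             col_idx_a, col_idx_b = kronecker_indices(col_idx, nr_cols_a, nr_cols_b, sc, r, max_rank)
--             terms.append(f"(SELECT SUM(column{col_idx_a:{col_format_a}}) FROM A) * "
--                          f"(SELECT SUM(column{col_idx_b:{col_format_b}}) FROM B)")
--         kronecker_query = f"SELECT {' + '.join(terms)};"
--
--     else:
--         # SUM product
--         combinations = itertools.product(*[itertools.product([idx], range(rank_k)) for idx in col_indices])
--         terms = []
--         for combination in combinations:
--             products_a = []
--             products_b = []
--             for col_idx, r in combination: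
--                 col_idx_a, col_idx_b = kronecker_indices(col_idx, nr_cols_a, nr_cols_b, sc, r, max_rank)
--                 products_a.append(f"column{col_idx_a:{col_format_a}}")
--                 products_b.append(f"column{col_idx_b:{col_format_b}}")
--             terms.append(f"(SELECT SUM({' * '.join(products_a)}) FROM A) * "
--                          f"(SELECT SUM({' * '.join(products_b)}) FROM B)")
--         kronecker_query = f"SELECT {' + '.join(terms)};"
--
--     return original_query, kronecker_query
-- ===== SOURCE B (Python) =====
-- def queries(col_indices: list[int],
--             nr_cols: int,
--             rank_k: int,
--             max_rank: int,
--             sc: bool = False,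
--             cc: bool = False,
--             nr_cols_b: int = None):
--     assert not (sc and cc)
--     assert (cc and nr_cols_b is not None) or (not cc and nr_cols_b is None)
--
--     nb = nr_cols if sc else nr_cols_b if cc else 1
--     na = nr_cols if sc else nr_cols // nb
--
--     def width(x):
--         return 3 if x > 100 else 2 if x > 10 else 1
--
--     wa, wb, wc = width(na * max_rank), width(nb * max_rank), width(nr_cols)
--
--     def ext(acc, name):
--         return acc + " * " + name if acc else name
--
--     orig_cols = ""
--     for i in col_indices:
--         orig_cols = ext(orig_cols, "column" + str(i).zfill(wc))
--     original_query = "SELECT SUM(" + orig_cols + ") FROM C;"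
--
--     # Grow the (A-product, B-product) strings of every term column by column:
--     # no itertools.product, no per-term list of names, no len==1 special case.
--     partials = [("", "")]
--     for idx in col_indices:
--         nxt = []
--         for pa, pb in partials:
--             for r in range(rank_k):
--                 if sc:
--                     a = b = idx * max_rank + r
--                 else:
--                     a = idx // nb + r * na
--                     b = idx % nb + r * nb
--                 nxt.append((ext(pa, "column" + str(a).zfill(wa)),
--                             ext(pb, "column" + str(b).zfill(wb))))
--         partials = nxt
--
--     kronecker_query = "SELECT " + " + ".join(
--         "(SELECT SUM(" + pa + ") FROM A) * (SELECT SUM(" + pb + ") FROM B)"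
--         for pa, pb in partials) + ";"
--     return original_query, kronecker_query
-- ===== Notes on version B (the rewrite author's own statement) =====
-- stated objective: alternative
-- what changed: B drops itertools.product, the per-term name lists and A's len==1 special case: it grows the (A-product, B-product) strings of all terms incrementally, column by column, with a single accumulator list of partial string pairs, and builds the original query's column chain with the same string accumulator instead of join over a comprehension.
import Mathlib
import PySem

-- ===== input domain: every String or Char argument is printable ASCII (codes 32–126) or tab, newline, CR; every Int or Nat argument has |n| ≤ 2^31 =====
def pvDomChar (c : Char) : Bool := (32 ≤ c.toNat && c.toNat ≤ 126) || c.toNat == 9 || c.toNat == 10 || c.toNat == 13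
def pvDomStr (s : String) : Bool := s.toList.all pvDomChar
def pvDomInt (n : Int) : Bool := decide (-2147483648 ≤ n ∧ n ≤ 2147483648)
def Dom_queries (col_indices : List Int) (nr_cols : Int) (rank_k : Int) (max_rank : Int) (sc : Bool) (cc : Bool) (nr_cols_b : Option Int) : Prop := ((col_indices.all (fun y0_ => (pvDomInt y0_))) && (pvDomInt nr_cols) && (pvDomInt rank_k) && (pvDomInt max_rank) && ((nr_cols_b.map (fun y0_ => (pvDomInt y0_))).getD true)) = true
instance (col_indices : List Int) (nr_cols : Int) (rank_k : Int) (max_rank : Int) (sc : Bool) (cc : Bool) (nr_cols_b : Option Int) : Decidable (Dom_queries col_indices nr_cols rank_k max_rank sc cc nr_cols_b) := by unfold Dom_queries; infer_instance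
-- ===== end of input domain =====

-- B replaces A's itertools.product over per-column name lists (and its len==1 special case)
-- by a single accumulator of partial (A-product, B-product) strings grown column by column
-- (objective: alternative — same cost, different construction; same return value).

-- shared primitive helpers (both Pythons use str(n).zfill(w) formatting, the same width rule
-- and the same term template)
def pvFmt (w : Int) (n : Int) : String := PySem.Str.zfill (PySem.Int.toStr n) w
def pvWidth (x : Int) : Int := if x > 100 then 3 else if x > 10 then 2 else 1
def pvTerm (a b : String) : String :=
  "(SELECT SUM(" ++ a ++ ") FROM A) * (SELECT SUM(" ++ b ++ ") FROM B)"

-- ===== PORT A =====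
def kronecker_indices (col_idx : Int) (nr_cols_a : Int) (nr_cols_b : Int) (sc : Bool) (r : Int) (max_rank : Int) : Int × Int :=
  if sc then
    (col_idx * max_rank + r, col_idx * max_rank + r)
  else
    (PySem.Int.floordiv col_idx nr_cols_b + r * nr_cols_a,
     PySem.Int.mod col_idx nr_cols_b + r * nr_cols_b)

-- itertools.product(*lists), each combination as a list (first factor varies slowest)
def pvCartProd {α : Type} : List (List α) → List (List α)
  | [] => [[]]
  | xs :: rest => xs.flatMap (fun x => (pvCartProd rest).map (fun t => x :: t))

def queries (col_indices : List Int) (nr_cols : Int) (rank_k : Int) (max_rank : Int) (sc : Bool) (cc : Bool) (nr_cols_b : Option Int) : String × String :=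
  -- Pre_ guarantees nr_cols_b is `some` whenever cc, so `.getD 0` is never the value used
  let nb : Int := if sc then nr_cols else if cc then nr_cols_b.getD 0 else 1
  let na : Int := if sc then nr_cols else PySem.Int.floordiv nr_cols nb
  let wa : Int := pvWidth (na * max_rank)
  let wb : Int := pvWidth (nb * max_rank)
  let wc : Int := pvWidth nr_cols
  let original_query : String :=
    "SELECT SUM(" ++ PySem.Str.join " * " (col_indices.map (fun i => "column" ++ pvFmt wc i)) ++ ") FROM C;"
  let kronecker_query : String :=
    if col_indices.length == 1 then
      -- col_indices[0]; the length is 1 so the index is in range and getD never supplies the default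
      let col_idx : Int := (PySem.List.pyGet? col_indices 0).getD 0
      let terms : List String :=
        (PySem.List.pyRange 0 rank_k 1).foldl (fun acc r =>
          acc ++ [pvTerm ("column" ++ pvFmt wa (kronecker_indices col_idx na nb sc r max_rank).1)
                         ("column" ++ pvFmt wb (kronecker_indices col_idx na nb sc r max_rank).2)]) []
      "SELECT " ++ PySem.Str.join " + " terms ++ ";"
    else
      let combinations : List (List (Int × Int)) :=
        pvCartProd (col_indices.map (fun idx => (PySem.List.pyRange 0 rank_k 1).map (fun r => (idx, r))))
      let terms : List String :=
        combinations.foldl (fun acc combination =>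
          acc ++ [pvTerm
            (PySem.Str.join " * " ((combination.foldl (fun (pab : List String × List String) c =>
              (pab.1 ++ ["column" ++ pvFmt wa (kronecker_indices c.1 na nb sc c.2 max_rank).1],
               pab.2 ++ ["column" ++ pvFmt wb (kronecker_indices c.1 na nb sc c.2 max_rank).2])) ([], [])).1))
            (PySem.Str.join " * " ((combination.foldl (fun (pab : List String × List String) c =>
              (pab.1 ++ ["column" ++ pvFmt wa (kronecker_indices c.1 na nb sc c.2 max_rank).1],
               pab.2 ++ ["column" ++ pvFmt wb (kronecker_indices c.1 na nb sc c.2 max_rank).2])) ([], [])).2))]) []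
      "SELECT " ++ PySem.Str.join " + " terms ++ ";"
  (original_query, kronecker_query)

-- ===== PORT B =====
-- B's local `ext(acc, name)`: `acc + " * " + name if acc else name`
def pvExt (acc name : String) : String := if acc ≠ "" then acc ++ " * " ++ name else name

def queries_alt (col_indices : List Int) (nr_cols : Int) (rank_k : Int) (max_rank : Int) (sc : Bool) (cc : Bool) (nr_cols_b : Option Int) : String × String :=
  let nb : Int := if sc then nr_cols else if cc then nr_cols_b.getD 0 else 1
  let na : Int := if sc then nr_cols else PySem.Int.floordiv nr_cols nb
  let wa : Int := pvWidth (na * max_rank)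
  let wb : Int := pvWidth (nb * max_rank)
  let wc : Int := pvWidth nr_cols
  let orig_cols : String :=
    col_indices.foldl (fun acc i => pvExt acc ("column" ++ pvFmt wc i)) ""
  let original_query : String := "SELECT SUM(" ++ orig_cols ++ ") FROM C;"
  let partials : List (String × String) :=
    col_indices.foldl (fun (ps : List (String × String)) idx =>
      ps.flatMap (fun p => (PySem.List.pyRange 0 rank_k 1).map (fun r =>
        let ab : Int × Int :=
          if sc then (idx * max_rank + r, idx * max_rank + r)
          else (PySem.Int.floordiv idx nb + r * na, PySem.Int.mod idx nb + r * nb)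
        (pvExt p.1 ("column" ++ pvFmt wa ab.1), pvExt p.2 ("column" ++ pvFmt wb ab.2)))))
      [("", "")]
  let kronecker_query : String :=
    "SELECT " ++ PySem.Str.join " + " (partials.map (fun p => pvTerm p.1 p.2)) ++ ";"
  (original_query, kronecker_query)

-- ===== PRECONDITION & SPEC =====
-- Pre_ excludes exactly the inputs where A raises: the two asserts (sc and cc together, or cc
-- not matching whether nr_cols_b is given) and the ZeroDivisionError when cc with nr_cols_b == 0.
def Pre_queries (col_indices : List Int) (nr_cols : Int) (rank_k : Int) (max_rank : Int) (sc : Bool) (cc : Bool) (nr_cols_b : Option Int) : Prop :=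
  ¬(sc = true ∧ cc = true) ∧ (cc = true ↔ nr_cols_b.isSome = true) ∧ nr_cols_b ≠ some 0
instance (col_indices : List Int) (nr_cols : Int) (rank_k : Int) (max_rank : Int) (sc : Bool) (cc : Bool) (nr_cols_b : Option Int) : Decidable (Pre_queries col_indices nr_cols rank_k max_rank sc cc nr_cols_b) := by unfold Pre_queries; infer_instance

def pvWitness_queries : List Int × Int × Int × Int × Bool × Bool × Option Int := ([1, 2], 4, 2, 2, false, false, none)

def Spec_queries (col_indices : List Int) (nr_cols : Int) (rank_k : Int) (max_rank : Int) (sc : Bool) (cc : Bool) (nr_cols_b : Option Int) (out : String × String) : Prop := out = queries_alt col_indices nr_cols rank_k max_rank sc cc nr_cols_b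
instance (col_indices : List Int) (nr_cols : Int) (rank_k : Int) (max_rank : Int) (sc : Bool) (cc : Bool) (nr_cols_b : Option Int) (out : String × String) : Decidable (Spec_queries col_indices nr_cols rank_k max_rank sc cc nr_cols_b out) := by unfold Spec_queries; infer_instance

-- ===== CLAIM (what is proved, stated in full; the proofs are below) =====
def Claim_equal_queries : Prop := ∀ (col_indices : List Int) (nr_cols : Int) (rank_k : Int) (max_rank : Int) (sc : Bool) (cc : Bool) (nr_cols_b : Option Int), Dom_queries col_indices nr_cols rank_k max_rank sc cc nr_cols_b → Pre_queries col_indices nr_cols rank_k max_rank sc cc nr_cols_b → Spec_queries col_indices nr_cols rank_k max_rank sc cc nr_cols_b (queries col_indices nr_cols rank_k max_rank sc cc nr_cols_b)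

-- ===== LEMMAS AND PROOFS =====

-- the (A-name, B-name) pair of one (column, r) slot, with the scalars abstracted
def pvName (sc : Bool) (nb na wa wb max_rank : Int) (idx r : Int) : String × String :=
  if sc then
    ("column" ++ pvFmt wa (idx * max_rank + r), "column" ++ pvFmt wb (idx * max_rank + r))
  else
    ("column" ++ pvFmt wa (PySem.Int.floordiv idx nb + r * na),
     "column" ++ pvFmt wb (PySem.Int.mod idx nb + r * nb))

theorem pv_name_eq (sc : Bool) (nb na wa wb max_rank idx r : Int) :
    pvName sc nb na wa wb max_rank idx r
      = ("column" ++ pvFmt wa (kronecker_indices idx na nb sc r max_rank).1,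
         "column" ++ pvFmt wb (kronecker_indices idx na nb sc r max_rank).2) := by
  cases sc <;> simp [pvName, kronecker_indices]

theorem pv_join_singleton (sep s : String) : PySem.Str.join sep [s] = s := by
  simp [PySem.Str.join, PySem.Chars.join_singleton]

theorem pv_foldl_append {α β : Type} (l : List α) (f : α → β) (acc : List β) :
    l.foldl (fun a x => a ++ [f x]) acc = acc ++ l.map f := by
  induction l generalizing acc with
  | nil => simp
  | cons x xs ih => simp [List.foldl_cons, ih]

theorem pv_foldl_pair {α β : Type} (l : List α) (fa fb : α → β) (u v : List β) :
    l.foldl (fun (p : List β × List β) x => (p.1 ++ [fa x], p.2 ++ [fb x])) (u, v)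
      = (u ++ l.map fa, v ++ l.map fb) := by
  induction l generalizing u v with
  | nil => simp
  | cons x xs ih => simp [List.foldl_cons, ih]

theorem pv_cartProd_map {α β : Type} (g : α → β) (ls : List (List α)) :
    pvCartProd (ls.map (List.map g)) = (pvCartProd ls).map (List.map g) := by
  induction ls with
  | nil => simp [pvCartProd]
  | cons x xs ih =>
    simp only [List.map_cons, pvCartProd, ih, List.flatMap_map, List.map_flatMap,
      List.map_map, Function.comp_def, List.map_cons]

theorem pv_cartProd_singleton {α : Type} (l : List α) :
    pvCartProd [l] = l.map (fun x => [x]) := by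
  induction l with
  | nil => simp [pvCartProd]
  | cons x xs ih => simp_all [pvCartProd]

-- A's whole Kronecker-query expression, rewritten as one map over the cartesian product
theorem pv_kq_eq (sc : Bool) (na nb wa wb max_rank rank_k : Int) (l : List Int) :
    (if l.length == 1 then
      "SELECT " ++ PySem.Str.join " + "
        ((PySem.List.pyRange 0 rank_k 1).foldl (fun acc r =>
          acc ++ [pvTerm ("column" ++ pvFmt wa (kronecker_indices ((PySem.List.pyGet? l 0).getD 0) na nb sc r max_rank).1)
                         ("column" ++ pvFmt wb (kronecker_indices ((PySem.List.pyGet? l 0).getD 0) na nb sc r max_rank).2)]) []) ++ ";"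
    else
      "SELECT " ++ PySem.Str.join " + "
        ((pvCartProd (l.map (fun idx => (PySem.List.pyRange 0 rank_k 1).map (fun r => (idx, r))))).foldl (fun acc combination =>
          acc ++ [pvTerm
            (PySem.Str.join " * " ((combination.foldl (fun (pab : List String × List String) c =>
              (pab.1 ++ ["column" ++ pvFmt wa (kronecker_indices c.1 na nb sc c.2 max_rank).1],
               pab.2 ++ ["column" ++ pvFmt wb (kronecker_indices c.1 na nb sc c.2 max_rank).2])) ([], [])).1))
            (PySem.Str.join " * " ((combination.foldl (fun (pab : List String × List String) c =>
              (pab.1 ++ ["column" ++ pvFmt wa (kronecker_indices c.1 na nb sc c.2 max_rank).1],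
               pab.2 ++ ["column" ++ pvFmt wb (kronecker_indices c.1 na nb sc c.2 max_rank).2])) ([], [])).2))]) []) ++ ";")
    = "SELECT " ++ PySem.Str.join " + "
        ((pvCartProd (l.map (fun idx => (PySem.List.pyRange 0 rank_k 1).map (fun r => pvName sc nb na wa wb max_rank idx r)))).map
          (fun combo => pvTerm (PySem.Str.join " * " (combo.map Prod.fst)) (PySem.Str.join " * " (combo.map Prod.snd)))) ++ ";" := by
  match l with
  | [] =>
    simp [pvCartProd]
  | [x] =>
    simp only [List.length_cons, List.length_nil, beq_self_eq_true, if_pos,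
      List.map_cons, List.map_nil, pv_cartProd_singleton, PySem.List.pyGet?_zero_cons,
      Option.getD_some, pv_foldl_append, List.nil_append, List.map_map, Function.comp_def,
      pv_name_eq, pv_join_singleton]
  | x :: y :: rest =>
    have hlen : ((x :: y :: rest).length == 1) = false := by simp
    rw [hlen]
    simp only [Bool.false_eq_true, if_false, pv_foldl_append, List.nil_append]
    congr 1
    congr 1
    congr 1
    have hfac : (x :: y :: rest).map (fun idx => (PySem.List.pyRange 0 rank_k 1).map
          (fun r => pvName sc nb na wa wb max_rank idx r))
        = ((x :: y :: rest).map (fun idx => (PySem.List.pyRange 0 rank_k 1).map (fun r => (idx, r)))).map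
            (List.map (fun c : Int × Int => pvName sc nb na wa wb max_rank c.1 c.2)) := by
      simp [List.map_map, Function.comp_def]
    rw [hfac, pv_cartProd_map, List.map_map]
    refine List.map_congr_left ?_
    intro combination _
    simp only [Function.comp_def, List.map_map, pv_foldl_pair, List.nil_append, pv_name_eq]

-- nonemptiness facts needed to turn pvExt folds into joins
theorem pv_column_ne (s : String) : ("column" ++ s) ≠ "" := by
  intro h
  have := congrArg String.toList h
  simp at this

theorem pv_append_ne (s t : String) (hs : s ≠ "") : (s ++ t) ≠ "" := by
  intro h
  have h2 := congrArg String.toList h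
  simp at h2
  exact hs h2.1

theorem pv_join_cons_cons (sep a b : String) (l : List String) :
    PySem.Str.join sep (a :: b :: l) = a ++ sep ++ PySem.Str.join sep (b :: l) := by
  simp [PySem.Str.join, PySem.Chars.join_cons_cons, String.append_assoc]

-- a pvExt fold from a nonempty seed is a join
theorem pv_foldl_ext (xs : List String) (s : String) (hs : s ≠ "") :
    xs.foldl pvExt s = PySem.Str.join " * " (s :: xs) := by
  induction xs generalizing s with
  | nil => simp [pv_join_singleton]
  | cons x xs ih =>
    have hstep : pvExt s x = s ++ " * " ++ x := by simp [pvExt, hs]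
    rw [List.foldl_cons, hstep, ih _ (pv_append_ne _ _ (pv_append_ne _ _ hs))]
    cases xs with
    | nil => rw [pv_join_singleton, pv_join_cons_cons, pv_join_singleton]
    | cons y ys =>
      rw [pv_join_cons_cons " * " (s ++ " * " ++ x) y ys,
        pv_join_cons_cons " * " s x (y :: ys), pv_join_cons_cons " * " x y ys]
      simp [String.append_assoc]

theorem pv_foldl_ext0 (xs : List String) (h : ∀ x ∈ xs, x ≠ "") :
    xs.foldl pvExt "" = PySem.Str.join " * " xs := by
  cases xs with
  | nil => rfl
  | cons x xs =>
    have hx : pvExt "" x = x := by simp [pvExt]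
    rw [List.foldl_cons, hx, pv_foldl_ext _ _ (h x (by simp))]

theorem pv_foldl_map' {α β γ : Type} (g : α → β) (f : γ → β → γ) (l : List α) (i : γ) :
    l.foldl (fun a x => f a (g x)) i = (l.map g).foldl f i := by
  induction l generalizing i with
  | nil => rfl
  | cons x xs ih => simp [List.foldl_cons, ih]

theorem pv_cartProd_mem {α : Type} (ls : List (List α)) (c : List α) (hc : c ∈ pvCartProd ls)
    (a : α) (ha : a ∈ c) : ∃ l ∈ ls, a ∈ l := by
  induction ls generalizing c with
  | nil =>
    simp [pvCartProd] at hc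
    subst hc; simp at ha
  | cons xs rest ih =>
    simp only [pvCartProd, List.mem_flatMap, List.mem_map] at hc
    obtain ⟨x, hx, t, ht, rfl⟩ := hc
    rcases List.mem_cons.mp ha with rfl | hat
    · exact ⟨xs, by simp, hx⟩
    · obtain ⟨l, hl, hal⟩ := ih t ht hat
      exact ⟨l, by simp [hl], hal⟩

-- the accumulator loop of B equals the cartesian-product form, with component folds
theorem pv_partials (nls : List (List (String × String))) (P : List (String × String)) :
    nls.foldl (fun ps ns => ps.flatMap (fun p => ns.map (fun n => (pvExt p.1 n.1, pvExt p.2 n.2)))) P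
      = P.flatMap (fun p => (pvCartProd nls).map (fun combo =>
          ((combo.map Prod.fst).foldl pvExt p.1, (combo.map Prod.snd).foldl pvExt p.2))) := by
  induction nls generalizing P with
  | nil => simp [pvCartProd]
  | cons ns rest ih =>
    rw [List.foldl_cons, ih]
    simp only [pvCartProd, List.map_flatMap, List.flatMap_map, List.flatMap_assoc,
      List.map_map, Function.comp_def, List.map_cons, List.foldl_cons]

-- both components of every slot name are nonempty
theorem pv_name_fst_ne (sc : Bool) (nb na wa wb max_rank idx r : Int) :
    (pvName sc nb na wa wb max_rank idx r).1 ≠ "" := by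
  cases sc <;> simp [pvName]

theorem pv_name_snd_ne (sc : Bool) (nb na wa wb max_rank idx r : Int) :
    (pvName sc nb na wa wb max_rank idx r).2 ≠ "" := by
  cases sc <;> simp [pvName]

-- B's Kronecker part equals the cartesian-product-of-joins form (the RHS of pv_kq_eq)
theorem pv_bk_eq (sc : Bool) (na nb wa wb max_rank rank_k : Int) (l : List Int) :
    (l.foldl (fun (ps : List (String × String)) idx =>
      ps.flatMap (fun p => (PySem.List.pyRange 0 rank_k 1).map (fun r =>
        let ab : Int × Int :=
          if sc then (idx * max_rank + r, idx * max_rank + r)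
          else (PySem.Int.floordiv idx nb + r * na, PySem.Int.mod idx nb + r * nb)
        (pvExt p.1 ("column" ++ pvFmt wa ab.1), pvExt p.2 ("column" ++ pvFmt wb ab.2)))))
      [("", "")]).map (fun p => pvTerm p.1 p.2)
    = (pvCartProd (l.map (fun idx => (PySem.List.pyRange 0 rank_k 1).map (fun r => pvName sc nb na wa wb max_rank idx r)))).map
        (fun combo => pvTerm (PySem.Str.join " * " (combo.map Prod.fst)) (PySem.Str.join " * " (combo.map Prod.snd))) := by
  have hinner : ∀ (ps : List (String × String)) (idx : Int),
      ps.flatMap (fun p => (PySem.List.pyRange 0 rank_k 1).map (fun r =>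
        let ab : Int × Int :=
          if sc then (idx * max_rank + r, idx * max_rank + r)
          else (PySem.Int.floordiv idx nb + r * na, PySem.Int.mod idx nb + r * nb)
        (pvExt p.1 ("column" ++ pvFmt wa ab.1), pvExt p.2 ("column" ++ pvFmt wb ab.2))))
      = ps.flatMap (fun p => ((PySem.List.pyRange 0 rank_k 1).map (fun r => pvName sc nb na wa wb max_rank idx r)).map
          (fun n => (pvExt p.1 n.1, pvExt p.2 n.2))) := by
    intro ps idx
    cases sc <;> simp [pvName, List.map_map, Function.comp_def]
  have hfold : l.foldl (fun (ps : List (String × String)) idx =>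
      ps.flatMap (fun p => (PySem.List.pyRange 0 rank_k 1).map (fun r =>
        let ab : Int × Int :=
          if sc then (idx * max_rank + r, idx * max_rank + r)
          else (PySem.Int.floordiv idx nb + r * na, PySem.Int.mod idx nb + r * nb)
        (pvExt p.1 ("column" ++ pvFmt wa ab.1), pvExt p.2 ("column" ++ pvFmt wb ab.2)))))
      [("", "")]
      = (l.map (fun idx => (PySem.List.pyRange 0 rank_k 1).map (fun r => pvName sc nb na wa wb max_rank idx r))).foldl
          (fun ps ns => ps.flatMap (fun p => ns.map (fun n => (pvExt p.1 n.1, pvExt p.2 n.2)))) [("", "")] := by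
    have hfun : (fun (ps : List (String × String)) (idx : Int) =>
        ps.flatMap (fun p => (PySem.List.pyRange 0 rank_k 1).map (fun r =>
          let ab : Int × Int :=
            if sc then (idx * max_rank + r, idx * max_rank + r)
            else (PySem.Int.floordiv idx nb + r * na, PySem.Int.mod idx nb + r * nb)
          (pvExt p.1 ("column" ++ pvFmt wa ab.1), pvExt p.2 ("column" ++ pvFmt wb ab.2)))))
      = (fun ps idx => ps.flatMap (fun p =>
          ((PySem.List.pyRange 0 rank_k 1).map (fun r => pvName sc nb na wa wb max_rank idx r)).map
            (fun n => (pvExt p.1 n.1, pvExt p.2 n.2)))) := by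
      funext ps idx; exact hinner ps idx
    rw [hfun]
    exact pv_foldl_map' (fun idx => (PySem.List.pyRange 0 rank_k 1).map
        (fun r => pvName sc nb na wa wb max_rank idx r))
      (fun ps ns => ps.flatMap (fun p => ns.map (fun n => (pvExt p.1 n.1, pvExt p.2 n.2)))) l [("", "")]
  rw [hfold, pv_partials]
  simp only [List.flatMap_cons, List.flatMap_nil, List.append_nil, List.map_map, Function.comp_def]
  refine List.map_congr_left ?_
  intro combo hcombo
  have hne1 : ∀ x ∈ combo.map Prod.fst, x ≠ "" := by
    intro x hx
    obtain ⟨n, hn, rfl⟩ := List.mem_map.mp hx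
    obtain ⟨ll, hll, hnl⟩ := pv_cartProd_mem _ _ hcombo _ hn
    obtain ⟨idx, _, rfl⟩ := List.mem_map.mp hll
    obtain ⟨r, _, rfl⟩ := List.mem_map.mp hnl
    exact pv_name_fst_ne sc nb na wa wb max_rank idx r
  have hne2 : ∀ x ∈ combo.map Prod.snd, x ≠ "" := by
    intro x hx
    obtain ⟨n, hn, rfl⟩ := List.mem_map.mp hx
    obtain ⟨ll, hll, hnl⟩ := pv_cartProd_mem _ _ hcombo _ hn
    obtain ⟨idx, _, rfl⟩ := List.mem_map.mp hll
    obtain ⟨r, _, rfl⟩ := List.mem_map.mp hnl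
    exact pv_name_snd_ne sc nb na wa wb max_rank idx r
  rw [pv_foldl_ext0 _ hne1, pv_foldl_ext0 _ hne2]

-- B's original-query column chain equals A's join over a comprehension
theorem pv_orig_eq (wc : Int) (l : List Int) :
    l.foldl (fun acc i => pvExt acc ("column" ++ pvFmt wc i)) ""
      = PySem.Str.join " * " (l.map (fun i => "column" ++ pvFmt wc i)) := by
  rw [pv_foldl_map' (fun i => "column" ++ pvFmt wc i) pvExt l ""]
  exact pv_foldl_ext0 _ (by intro x hx; obtain ⟨i, _, rfl⟩ := List.mem_map.mp hx; exact pv_column_ne _)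

-- ===== VERDICT (by name: the statement is the Claim_ definition above) =====
theorem queries_spec : Claim_equal_queries := by
  intro col_indices nr_cols rank_k max_rank sc cc nr_cols_b _ _
  unfold Spec_queries queries queries_alt
  simp only
  refine Prod.ext ?_ ?_
  · simp only [pv_orig_eq]
  · show _ = "SELECT " ++ PySem.Str.join " + " _ ++ ";"
    rw [pv_bk_eq]
    exact pv_kq_eq sc _ _ _ _ max_rank rank_k col_indices
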